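-- pv_equiv track=rewrite | github.com/natiroir/Poker-algorithme | modules/quigagnecode.py | couleur
-- ===== SOURCE A (Python) =====
-- from collections import Counter
--
-- def couleur(liste1):
--     liste = [t[1] for t in liste1]
--     valeur_avec_au_moins_5_occurrences = ([valeur for valeur, count in Counter(liste).items() if count >= 5])
--     if valeur_avec_au_moins_5_occurrences == []:
--         return (0,0)
--     else:
--         valeur_avec_au_moins_5_occurrences = valeur_avec_au_moins_5_occurrences[0]
--         k=0
--         for i in liste1:
--             if i[1] == valeur_avec_au_moins_5_occurrences:
--                 if i[0]>=k:
--                     k = i[0]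
--         return (valeur_avec_au_moins_5_occurrences,k)
-- ===== SOURCE B (Python) =====
-- def couleur(liste1):
--     # one aggregating pass: suit -> (count, running max floored at 0), kept in first-appearance order
--     agg = {}
--     for v, s in liste1:
--         c, m = agg.get(s, (0, 0))
--         agg[s] = (c + 1, m if m > v else v)
--     for s, (c, m) in agg.items():
--         if c >= 5:
--             return (s, m)
--     return (0, 0)
-- ===== Notes on version B (the rewrite author's own statement) =====
-- stated objective: alternative
-- what changed: Replaces Counter-then-rescan (a second full pass over liste1 for the chosen suit's max) with a single aggregating pass keeping per-suit (count, running max floored at 0) in one first-appearance-ordered dict, then reading off the first suit with count >= 5.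
import Mathlib
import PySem

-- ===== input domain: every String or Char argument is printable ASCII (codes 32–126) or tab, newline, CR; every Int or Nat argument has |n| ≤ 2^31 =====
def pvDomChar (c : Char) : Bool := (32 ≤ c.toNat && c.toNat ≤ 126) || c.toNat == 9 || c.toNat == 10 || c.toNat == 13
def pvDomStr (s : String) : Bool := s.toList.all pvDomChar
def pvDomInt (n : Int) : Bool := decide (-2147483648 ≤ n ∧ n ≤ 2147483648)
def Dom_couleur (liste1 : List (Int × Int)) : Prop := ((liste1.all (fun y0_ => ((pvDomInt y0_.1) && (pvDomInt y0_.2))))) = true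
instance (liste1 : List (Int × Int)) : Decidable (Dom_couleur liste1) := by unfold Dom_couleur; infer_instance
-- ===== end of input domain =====

-- B replaces A's Counter-then-rescan with one aggregating pass keeping per-suit (count, running max); objective: alternative single-pass decomposition.

-- ===== PORT A =====
def couleur (liste1 : List (Int × Int)) : Int × Int :=
  let liste := liste1.map (·.2)
  let vs := ((PySem.Dict.counter liste).items.filter (fun p => 5 ≤ p.2)).map (·.1)
  match vs with
  | [] => (0, 0)
  | v :: _ =>
    let k := liste1.foldl (fun k i => if i.2 == v then (if k ≤ i.1 then i.1 else k) else k) 0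
    (v, k)

-- ===== PORT B =====
def couleur_alt (liste1 : List (Int × Int)) : Int × Int :=
  let agg : PySem.Dict Int (Int × Int) :=
    liste1.foldl (fun d t =>
      let cm := d.getD t.2 (0, 0)
      d.insert t.2 (cm.1 + 1, if cm.2 > t.1 then cm.2 else t.1)) PySem.Dict.empty
  match agg.items.find? (fun p => 5 ≤ p.2.1) with
  | some p => (p.1, p.2.2)
  | none => (0, 0)

-- ===== PRECONDITION & SPEC =====
def Spec_couleur (liste1 : List (Int × Int)) (out : Int × Int) : Prop := out = couleur_alt liste1
instance (liste1 : List (Int × Int)) (out : Int × Int) : Decidable (Spec_couleur liste1 out) := by unfold Spec_couleur; infer_instance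

-- ===== CLAIM (what is proved, stated in full; the proofs are below) =====
def Claim_equal_couleur : Prop := ∀ (liste1 : List (Int × Int)), Dom_couleur liste1 → Spec_couleur liste1 (couleur liste1)

-- ===== LEMMAS AND PROOFS =====

theorem getD_agg_fold (l : List (Int × Int)) (d : PySem.Dict Int (Int × Int)) (s : Int) :
    (l.foldl (fun d t =>
      let cm := d.getD t.2 (0, 0)
      d.insert t.2 (cm.1 + 1, if cm.2 > t.1 then cm.2 else t.1)) d).getD s (0, 0)
    = (l.filter (fun t => t.2 == s)).foldl
        (fun cm t => (cm.1 + 1, if cm.2 > t.1 then cm.2 else t.1)) (d.getD s (0, 0)) := by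
  induction l generalizing d with
  | nil => rfl
  | cons t l ih =>
    simp only [List.foldl_cons, List.filter_cons]
    by_cases h : t.2 = s
    · subst h
      simp only [beq_self_eq_true, if_true, List.foldl_cons, ih]
      rw [PySem.Dict.getD_insert_self]
    · have hb : (t.2 == s) = false := by simp [h]
      simp only [hb, Bool.false_eq_true, if_false, ih]
      rw [PySem.Dict.getD_insert_of_ne (hne := fun he => h he.symm)]

theorem couleur_eq_alt (liste1 : List (Int × Int)) :
    (let liste := liste1.map (·.2)
     let vs := ((PySem.Dict.counter liste).items.filter (fun p => 5 ≤ p.2)).map (·.1)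
     match vs with
     | [] => ((0 : Int), (0 : Int))
     | v :: _ =>
       let k := liste1.foldl (fun k i => if i.2 == v then (if k ≤ i.1 then i.1 else k) else k) 0
       (v, k))
    = (let agg : PySem.Dict Int (Int × Int) :=
         liste1.foldl (fun d t =>
           let cm := d.getD t.2 (0, 0)
           d.insert t.2 (cm.1 + 1, if cm.2 > t.1 then cm.2 else t.1)) PySem.Dict.empty
       match agg.items.find? (fun p => 5 ≤ p.2.1) with
       | some p => (p.1, p.2.2)
       | none => ((0:Int), (0:Int))) := by
  set liste := liste1.map (·.2) with hliste
  set agg : PySem.Dict Int (Int × Int) :=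
    liste1.foldl (fun d t =>
      let cm := d.getD t.2 (0, 0)
      d.insert t.2 (cm.1 + 1, if cm.2 > t.1 then cm.2 else t.1)) PySem.Dict.empty with hagg
  have hkeys : agg.keys = PySem.Set.ofList liste := by
    rw [hliste, PySem.Set.ofList_eq_foldl]
    exact PySem.Dict.keys_foldl_insert_key (l := liste1) (key := fun t : Int × Int => t.2)
      (f := fun d t => ((d.getD t.2 (0,0)).1 + 1,
        if (d.getD t.2 (0,0)).2 > t.1 then (d.getD t.2 (0,0)).2 else t.1))
      (d := PySem.Dict.empty)
  have hnd : agg.keys.Nodup := by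
    exact PySem.Dict.nodup_keys_foldl_insert_key (l := liste1) (key := fun t : Int × Int => t.2)
      (f := fun d t => ((d.getD t.2 (0,0)).1 + 1,
        if (d.getD t.2 (0,0)).2 > t.1 then (d.getD t.2 (0,0)).2 else t.1))
      (d := PySem.Dict.empty) (by simp)
  have hgetD : ∀ k : Int, agg.getD k (0,0)
      = ((liste1.filter (fun t => t.2 == k)).foldl (fun c _ => c + 1) 0,
         (liste1.filter (fun t => t.2 == k)).foldl (fun m t => if m > t.1 then m else t.1) 0) := by
    intro k
    rw [hagg, getD_agg_fold]
    rw [show (PySem.Dict.empty : PySem.Dict Int (Int × Int)).getD k (0,0) = ((0:Int),(0:Int)) from rfl]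
    rw [PySem.List.foldl_prod_mk (f := fun c (_ : Int × Int) => c + 1)
      (g := fun m (t : Int × Int) => if m > t.1 then m else t.1)]
  have hcount : ∀ k : Int, (liste.count k : Int)
      = (liste1.filter (fun t => t.2 == k)).foldl (fun c _ => c + 1) 0 := by
    intro k
    rw [PySem.List.foldl_add (g := fun _ => (1:Int))]
    rw [PySem.List.sum_map_const_int]
    have : liste.count k = liste1.countP (fun t => t.2 == k) := by
      rw [hliste]; simp [List.count, List.countP_map]; rfl
    rw [this, List.countP_eq_length_filter]
    ring
  have hitemsB : agg.items = (PySem.Set.ofList liste).map (fun k => (k, agg.getD k (0,0))) := by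
    rw [PySem.Dict.items_eq_map_keys agg hnd (0,0), hkeys]
  have hitemsA : (PySem.Dict.counter liste).items
      = (PySem.Set.ofList liste).map (fun k => (k, (liste.count k : Int))) :=
    PySem.Dict.items_counter liste
  -- both sides driven by the filtered key list
  have hpred : ∀ k : Int, (decide (5 ≤ (liste.count k : Int))) = (decide (5 ≤ (agg.getD k (0,0)).1)) := by
    intro k; rw [hgetD, hcount]
  simp only [hitemsA, hitemsB, List.filter_map, List.find?_map]
  have hflt : (PySem.Set.ofList liste).filter ((fun p : Int × Int => decide (5 ≤ p.2)) ∘ (fun k => (k, (liste.count k : Int))))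
      = (PySem.Set.ofList liste).filter (fun k => decide (5 ≤ (agg.getD k (0,0)).1)) := by
    apply List.filter_congr; intro k _; exact hpred k
  have hfnd : (PySem.Set.ofList liste).find? ((fun p : Int × (Int × Int) => decide (5 ≤ p.2.1)) ∘ (fun k => (k, agg.getD k (0,0))))
      = ((PySem.Set.ofList liste).filter (fun k => decide (5 ≤ (agg.getD k (0,0)).1))).head? := by
    rw [← List.head?_filter]; rfl
  rw [hflt, hfnd]
  cases hc : ((PySem.Set.ofList liste).filter (fun k => decide (5 ≤ (agg.getD k (0,0)).1))) with
  | nil => simp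
  | cons v rest =>
    simp only [List.map_cons, List.head?_cons, Option.map_some]
    have hA : liste1.foldl (fun k i => if i.2 == v then (if k ≤ i.1 then i.1 else k) else k) 0
        = (liste1.filter (fun t => t.2 == v)).foldl (fun m t => if m > t.1 then m else t.1) 0 := by
      rw [PySem.List.foldl_if_eq_foldl_filter (p := fun t : Int × Int => t.2 == v)
        (f := fun k i => if k ≤ i.1 then i.1 else k)]
      apply PySem.List.foldl_congr_mem
      intro acc x _
      by_cases h : acc ≤ x.1 <;> by_cases h2 : acc > x.1 <;> simp [h, h2] <;> omega
    simp only [hA, hgetD]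

-- ===== VERDICT (by name: the statement is the Claim_ definition above) =====
theorem couleur_spec : Claim_equal_couleur := by
  intro liste1 _
  exact couleur_eq_alt liste1
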